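-- pv_equiv track=rewrite | github.com/quoth-le-corbeau/advent_of_code | advent_2019/day_4/p2.py | _contains_adjacent_exact_pair
-- ===== SOURCE A (Python) =====
-- def _contains_adjacent_exact_pair(num_string: str) -> bool:
--     i = 0
--     end_index = len(num_string) - 1
--     count = 0
--     while i < end_index:
--         if num_string[i + 1] != num_string[i] and count == 1:
--             return True
--         elif num_string[i + 1] == num_string[i]:
--             count += 1
--         else:
--             count = 0
--         i += 1
--     if count == 1:
--         return True
--     return False
-- ===== SOURCE B (Python) =====
-- def _contains_adjacent_exact_pair(num_string: str) -> bool: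
--     # Materialise the lengths of maximal runs of equal characters, then
--     # ask whether any run has length exactly 2.
--     run_lengths = []
--     i = 0
--     n = len(num_string)
--     while i < n:
--         j = i
--         while j < n and num_string[j] == num_string[i]:
--             j += 1
--         run_lengths.append(j - i)
--         i = j
--     return any(r == 2 for r in run_lengths)
-- ===== Notes on version B (the rewrite author's own statement) =====
-- stated objective: idiomatic
-- what changed: B materialises the lengths of the maximal runs of equal characters (an inner scan per run) and returns whether any run length equals 2, instead of A's single index walk with a running adjacent-pair counter and transition branches.
import Mathlib
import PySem

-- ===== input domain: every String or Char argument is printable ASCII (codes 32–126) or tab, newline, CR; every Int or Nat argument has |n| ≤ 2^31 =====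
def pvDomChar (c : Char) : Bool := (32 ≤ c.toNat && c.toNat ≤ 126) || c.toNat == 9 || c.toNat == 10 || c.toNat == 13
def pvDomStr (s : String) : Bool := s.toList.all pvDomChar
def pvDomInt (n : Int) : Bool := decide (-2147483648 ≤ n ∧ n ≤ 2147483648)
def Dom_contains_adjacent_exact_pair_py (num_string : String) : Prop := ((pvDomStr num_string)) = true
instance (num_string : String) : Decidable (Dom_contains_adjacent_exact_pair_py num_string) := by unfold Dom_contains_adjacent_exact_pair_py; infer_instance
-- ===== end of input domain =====

-- B replaces A's index walk with a running pair-counter by materialising the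
-- lengths of the maximal runs of equal characters and asking whether any run
-- has length exactly 2 (objective: idiomatic; same O(n) cost).

-- ===== PORT A =====
-- A's while loop compares num_string[i] with num_string[i+1]; ported as the
-- standard pairwise recursion carrying the previous character and the count.
def pvLoopA (c : Char) (rest : List Char) (count : Int) : Bool :=
  match rest with
  | [] => count == 1                 -- post-loop 'if count == 1'
  | d :: rest' =>
    if d ≠ c ∧ count = 1 then true
    else if d = c then pvLoopA d rest' (count + 1)
    else pvLoopA d rest' 0

def contains_adjacent_exact_pair_py (num_string : String) : Bool :=
  match num_string.toList with
  | [] => false                      -- loop never runs, count = 0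
  | c :: rest => pvLoopA c rest 0

-- ===== PORT B =====
-- run lengths of maximal runs of equal characters (B's outer/inner while loops:
-- the inner scan is the takeWhile/dropWhile split, j - i = prefix length + 1)
def pvRuns (l : List Char) : List Nat :=
  match l with
  | [] => []
  | c :: rest =>
    ((rest.takeWhile (· == c)).length + 1) :: pvRuns (rest.dropWhile (· == c))
termination_by l.length
decreasing_by
  exact Nat.lt_succ_of_le (List.length_dropWhile_le _ _)

def contains_adjacent_exact_pair_py_alt (num_string : String) : Bool :=
  (pvRuns num_string.toList).any (· == 2)

-- ===== PRECONDITION & SPEC =====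
def Spec_contains_adjacent_exact_pair_py (num_string : String) (out : Bool) : Prop := out = contains_adjacent_exact_pair_py_alt num_string
instance (num_string : String) (out : Bool) : Decidable (Spec_contains_adjacent_exact_pair_py num_string out) := by unfold Spec_contains_adjacent_exact_pair_py; infer_instance

-- ===== CLAIM (what is proved, stated in full; the proofs are below) =====
def Claim_equal_contains_adjacent_exact_pair_py : Prop := ∀ (num_string : String), Dom_contains_adjacent_exact_pair_py num_string → Spec_contains_adjacent_exact_pair_py num_string (contains_adjacent_exact_pair_py num_string)

-- ===== LEMMAS AND PROOFS =====

theorem pvRuns_nil : pvRuns [] = [] := by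
  unfold pvRuns; rfl

theorem pvRuns_cons (c : Char) (rest : List Char) :
    pvRuns (c :: rest)
      = ((rest.takeWhile (· == c)).length + 1) :: pvRuns (rest.dropWhile (· == c)) := by
  conv_lhs => rw [pvRuns]

-- A's loop state (previous char c, count) characterised by B's run structure:
-- count + (length of the rest of the current run) = 1 means "current run ends
-- with exactly-pair shape", and after the current run B's scan continues.
theorem pvLoopA_spec (rest : List Char) (c : Char) (k : Int) :
    pvLoopA c rest k
      = (decide (k + ((rest.takeWhile (· == c)).length : Int) = 1)
          || (pvRuns (rest.dropWhile (· == c))).any (· == 2)) := by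
  induction rest generalizing c k with
  | nil =>
    by_cases h : k = 1 <;> simp [pvLoopA, pvRuns_nil, h]
  | cons d rest' ih =>
    by_cases h1 : d = c
    · subst h1
      have hL : pvLoopA d (d :: rest') k = pvLoopA d rest' (k + 1) := by
        simp [pvLoopA]
      rw [hL, ih]
      simp only [List.takeWhile_cons, List.dropWhile_cons, beq_self_eq_true,
        if_true, List.length_cons]
      congr 1
      rw [decide_eq_decide]
      push_cast
      omega
    · have hd : (d == c) = false := by simp [h1]
      by_cases h2 : k = 1
      · subst h2
        have hL : pvLoopA c (d :: rest') 1 = true := by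
          simp [pvLoopA, h1]
        rw [hL]
        simp [hd]
      · have hL : pvLoopA c (d :: rest') k = pvLoopA d rest' 0 := by
          simp [pvLoopA, h1, h2]
        rw [hL, ih]
        simp only [List.takeWhile_cons, List.dropWhile_cons, hd,
          Bool.false_eq_true, if_false, List.length_nil, Nat.cast_zero, add_zero,
          pvRuns_cons, List.any_cons]
        rw [decide_eq_false h2]
        have : ((rest'.takeWhile (· == d)).length + 1 == 2)
            = decide ((0:Int) + ((rest'.takeWhile (· == d)).length : Int) = 1) := by
          rcases eq_or_ne (rest'.takeWhile (· == d)).length 1 with h | h <;>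
            simp [h]
        rw [Bool.false_or, this]

theorem pvMain (l : List Char) :
    (match l with
      | [] => false
      | c :: rest => pvLoopA c rest 0) = (pvRuns l).any (· == 2) := by
  cases l with
  | nil => simp [pvRuns_nil]
  | cons c rest =>
    show pvLoopA c rest 0 = _
    rw [pvLoopA_spec, pvRuns_cons]
    simp only [List.any_cons, Int.zero_add]
    congr 1
    rcases eq_or_ne (rest.takeWhile (· == c)).length 1 with h | h <;>
      simp [h]

-- ===== VERDICT (by name: the statement is the Claim_ definition above) =====
theorem contains_adjacent_exact_pair_py_spec : Claim_equal_contains_adjacent_exact_pair_py := by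
  intro s _
  unfold Spec_contains_adjacent_exact_pair_py contains_adjacent_exact_pair_py
    contains_adjacent_exact_pair_py_alt
  exact pvMain s.toList
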